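-- pv_equiv track=rewrite | github.com/wangxiancao/xhs_note | RedInk/backend/routes/publish_routes.py | _parse_tags_form
-- ===== SOURCE A (Python) =====
-- def _parse_tags_form(values):
--     """解析 multipart/form-data 中的 tags 字段"""
--     tags = []
--     for raw in values:
--         if raw is None:
--             continue
--         for item in str(raw).split(","):
--             tag = item.strip()
--             if tag:
--                 tags.append(tag)
--     return tags
-- ===== SOURCE B (Python) =====
-- def _parse_tags_form(values):
--     # Single character-level scan: a state machine with a current-token buffer and a
--     # pending-trailing-whitespace buffer; no split()/strip() calls at all.
--     tags = []
--     ws = " \t\n\r\v\f"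
--     for raw in values:
--         if raw is None:
--             continue
--         token = ""
--         pending = ""
--         for ch in str(raw):
--             if ch == ",":
--                 if token:
--                     tags.append(token)
--                 token = ""
--                 pending = ""
--             elif ch in ws:
--                 if token:
--                     pending += ch
--             else:
--                 token += pending + ch
--                 pending = ""
--         if token:
--             tags.append(token)
--     return tags
-- ===== Notes on version B (the rewrite author's own statement) =====
-- stated objective: alternative
-- what changed: Replaces the split/strip/filter pipeline by a single character-level state machine that scans each value once, maintaining a current-token buffer and a pending-trailing-whitespace buffer, emitting a tag at each comma or end of value; no split() or strip() calls at all.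
import Mathlib
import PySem

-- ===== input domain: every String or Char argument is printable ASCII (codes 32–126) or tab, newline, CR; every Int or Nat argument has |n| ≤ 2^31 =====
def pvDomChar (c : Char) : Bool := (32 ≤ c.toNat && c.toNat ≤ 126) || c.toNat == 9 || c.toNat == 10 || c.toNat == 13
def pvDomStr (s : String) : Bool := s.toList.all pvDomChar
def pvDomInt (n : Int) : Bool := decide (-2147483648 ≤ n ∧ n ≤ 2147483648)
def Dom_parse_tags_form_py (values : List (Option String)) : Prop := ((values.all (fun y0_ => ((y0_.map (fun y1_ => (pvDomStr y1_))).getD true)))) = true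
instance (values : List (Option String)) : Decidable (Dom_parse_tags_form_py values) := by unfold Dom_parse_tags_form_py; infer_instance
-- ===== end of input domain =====

-- B replaces A's split/strip/filter pipeline by a single character-level state machine
-- (current-token buffer + pending-trailing-whitespace buffer); alternative decomposition, same cost.

-- ===== PORT A =====
-- A: for each non-None value, split on ",", strip each piece, append the non-empty ones.
def parse_tags_form_py (values : List (Option String)) : List String :=
  values.foldl (fun tags raw =>
    match raw with
    | none => tags
    | some s =>
      (PySem.Chars.splitOn s.toList [',']).foldl (fun tags item =>
        let tag := PySem.Chars.strip item
        if tag ≠ [] then tags ++ [String.ofList tag] else tags) tags) []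

-- ===== PORT B =====
-- B: scan each value's characters once; `token` is the current tag so far (left-stripped,
-- ending in non-whitespace), `pending` holds whitespace not yet known to be trailing;
-- a tag is emitted at each ',' and at end of value.  (Python: ws = " \t\n\r\v\f".)
def pvWs : List Char := [' ', '\t', '\n', '\r', '\x0b', '\x0c']

def scanB : List Char → List Char → List Char → List String → List String
  | [], token, _pending, tags =>
      if token ≠ [] then tags ++ [String.ofList token] else tags
  | c :: rest, token, pending, tags =>
      if c = ',' then
        scanB rest [] [] (if token ≠ [] then tags ++ [String.ofList token] else tags)
      else if pvWs.contains c then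
        scanB rest token (if token ≠ [] then pending ++ [c] else pending) tags
      else
        scanB rest (token ++ pending ++ [c]) [] tags

def parse_tags_form_py_alt (values : List (Option String)) : List String :=
  values.foldl (fun tags raw =>
    match raw with
    | none => tags
    | some s => scanB s.toList [] [] tags) []

-- ===== PRECONDITION & SPEC =====
def Spec_parse_tags_form_py (values : List (Option String)) (out : List String) : Prop := out = parse_tags_form_py_alt values
instance (values : List (Option String)) (out : List String) : Decidable (Spec_parse_tags_form_py values out) := by unfold Spec_parse_tags_form_py; infer_instance

-- ===== CLAIM (what is proved, stated in full; the proofs are below) =====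
def Claim_equal_parse_tags_form_py : Prop := ∀ (values : List (Option String)), Dom_parse_tags_form_py values → Spec_parse_tags_form_py values (parse_tags_form_py values)

-- ===== LEMMAS AND PROOFS =====

def mySplit : List Char → List (List Char)
  | [] => [[]]
  | c :: rest => if c = ',' then [] :: mySplit rest else (mySplit rest).modifyHead (c :: ·)

theorem mySplit_ne_nil : ∀ l : List Char, mySplit l ≠ []
  | [] => by simp [mySplit]
  | c :: rest => by
    simp only [mySplit]
    split_ifs
    · simp
    · cases h : mySplit rest with
      | nil => exact absurd h (mySplit_ne_nil rest)
      | cons x xs => simp [List.modifyHead]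

theorem go_spec (fuel : Nat) (l cur : List Char) (acc : List (List Char)) (h : l.length ≤ fuel) :
    PySem.Chars.splitOn.go [','] fuel l cur acc
      = acc.reverse ++ ((mySplit l).modifyHead (cur.reverse ++ ·)) := by
  induction fuel generalizing l cur acc with
  | zero =>
    have : l = [] := List.length_eq_zero_iff.mp (Nat.le_zero.mp h)
    subst this
    rw [PySem.Chars.splitOn.go]
    simp [mySplit, List.modifyHead]
  | succ fuel ih =>
    cases l with
    | nil =>
      rw [PySem.Chars.splitOn.go]
      · simp [mySplit, List.modifyHead]
      · omega
    | cons c rest =>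
      rw [PySem.Chars.splitOn.go]
      by_cases hc : c = ','
      · subst hc
        have hpre : [','].isPrefixOf (',' :: rest) = true := by simp [List.isPrefixOf]
        rw [if_pos hpre]
        rw [show List.drop ([','].length) (',' :: rest) = rest from rfl]
        rw [ih rest [] (List.reverse cur :: acc) (by simp at h ⊢; omega)]
        simp [mySplit, List.modifyHead]
        cases mySplit rest <;> rfl
      · have hpre : [','].isPrefixOf (c :: rest) = false := by
          simp only [List.isPrefixOf, Bool.and_true]
          exact decide_eq_false (fun he => hc he.symm)
        rw [if_neg (by simp [hpre])]
        rw [ih rest (c :: cur) acc (by simp at h ⊢; omega)]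
        simp only [mySplit, if_neg hc]
        obtain ⟨r, rs, hr⟩ := List.exists_cons_of_ne_nil (mySplit_ne_nil rest)
        rw [hr]
        simp [List.modifyHead]

theorem splitOn_eq_mySplit (s : List Char) : PySem.Chars.splitOn s [','] = mySplit s := by
  rw [PySem.Chars.splitOn, go_spec _ _ _ _ (by omega)]
  obtain ⟨r, rs, hr⟩ := List.exists_cons_of_ne_nil (mySplit_ne_nil s)
  rw [hr]
  simp [List.modifyHead]

def pieceF (cs : List Char) : List String :=
  (((mySplit cs).map PySem.Chars.strip).filter (· ≠ [])).map String.ofList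

-- A-side characterisation --------------------------------------------------

theorem inner_foldl (lst : List (List Char)) (tags : List String) :
    lst.foldl (fun tags item =>
      let tag := PySem.Chars.strip item
      if tag ≠ [] then tags ++ [String.ofList tag] else tags) tags
    = tags ++ ((lst.map PySem.Chars.strip).filter (· ≠ [])).map String.ofList := by
  have h := PySem.List.foldl_append_if (fun item => decide (PySem.Chars.strip item ≠ []))
    (fun item => String.ofList (PySem.Chars.strip item)) lst tags
  simp only [decide_eq_true_eq] at h
  rw [h, List.filter_map, List.map_map]
  simp only [Function.comp_def]

theorem a_foldl (values : List (Option String)) (acc : List String) :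
    values.foldl (fun tags raw =>
      match raw with
      | none => tags
      | some s =>
        (PySem.Chars.splitOn s.toList [',']).foldl (fun tags item =>
          let tag := PySem.Chars.strip item
          if tag ≠ [] then tags ++ [String.ofList tag] else tags) tags) acc
    = acc ++ (values.filterMap id).flatMap (fun s => pieceF s.toList) := by
  induction values generalizing acc with
  | nil => simp
  | cons raw vs ih =>
    cases raw with
    | none => exact ih acc
    | some s =>
      rw [List.foldl_cons]
      show List.foldl _ ((PySem.Chars.splitOn s.toList [',']).foldl
        (fun tags item => let tag := PySem.Chars.strip item;
          if tag ≠ [] then tags ++ [String.ofList tag] else tags) acc) vs = _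
      rw [inner_foldl, ih, splitOn_eq_mySplit]
      simp only [List.filterMap_cons, id]
      rw [List.flatMap_cons]
      simp [pieceF, List.filter_map, Function.comp_def]

-- character classes --------------------------------------------------------

theorem chtoNat_inj (c d : Char) : c = d ↔ c.toNat = d.toNat := by
  constructor
  · intro h; rw [h]
  · intro h; apply Char.ext; exact UInt32.toNat_inj.mp h

theorem ws_iff (c : Char) (h : pvDomChar c = true) : pvWs.contains c = PySem.Chars.isspace c := by
  simp only [pvDomChar, Bool.or_eq_true, Bool.and_eq_true, beq_iff_eq, decide_eq_true_eq] at h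
  rw [Bool.eq_iff_iff]
  simp only [pvWs, List.contains_cons, List.contains_nil, PySem.Chars.isspace,
    Bool.or_eq_true, Bool.and_eq_true, beq_iff_eq, decide_eq_true_eq, chtoNat_inj,
    show (' ').toNat = 32 from rfl, show ('\t').toNat = 9 from rfl, show ('\n').toNat = 10 from rfl,
    show ('\r').toNat = 13 from rfl, show ('\x0b').toNat = 11 from rfl,
    show ('\x0c').toNat = 12 from rfl, Bool.false_eq_true, or_false]
  constructor
  · intro hx; omega
  · intro hx; omega

-- strip facts --------------------------------------------------------------

theorem dropWhile_all {p : Char → Bool} (a b : List Char) (h : ∀ x ∈ a, p x = true) :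
    List.dropWhile p (a ++ b) = List.dropWhile p b := by
  induction a with
  | nil => rfl
  | cons x xs ih =>
    simp only [List.cons_append, List.dropWhile_cons, h x (by simp), if_true]
    exact ih (fun y hy => h y (by simp [hy]))

theorem strip_cons_ws (c : Char) (x : List Char) (h : PySem.Chars.isspace c = true) :
    PySem.Chars.strip (c :: x) = PySem.Chars.strip x := by
  simp [PySem.Chars.strip, PySem.Chars.lstrip, h]

-- the state (token, pending) compresses the consumed part of the current piece:
-- strip (token ++ pending) = token
theorem strip_state (token pending : List Char)
    (hp : ∀ x ∈ pending, PySem.Chars.isspace x = true)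
    (he : token = [] → pending = [])
    (ht : ∀ h : token ≠ [], PySem.Chars.isspace (token.head h) = false ∧
          PySem.Chars.isspace (token.getLast h) = false) :
    PySem.Chars.strip (token ++ pending) = token := by
  cases htk : token with
  | nil =>
    rw [he htk]
    rfl
  | cons t ts =>
    have hne : token ≠ [] := by simp [htk]
    obtain ⟨hth, htl⟩ := ht hne
    have hhead : PySem.Chars.isspace t = false := by
      have : token.head hne = t := by simp [htk]
      rwa [this] at hth
    obtain ⟨ds, d, hd⟩ := (List.eq_nil_or_concat token).resolve_left hne
    have hlast : PySem.Chars.isspace d = false := by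
      have : token.getLast hne = d := by simp [hd]
      rwa [this] at htl
    rw [← htk]
    unfold PySem.Chars.strip PySem.Chars.lstrip PySem.Chars.rstrip
    have hl : List.dropWhile PySem.Chars.isspace (token ++ pending) = token ++ pending := by
      rw [htk]
      simp only [List.cons_append, List.dropWhile_cons, hhead, Bool.false_eq_true, if_false]
    rw [hl, List.reverse_append, dropWhile_all pending.reverse token.reverse (by simpa using hp),
        hd, List.concat_eq_append, List.reverse_append]
    simp [hlast]

-- pieceP: the tags still to come from cs, given that `pre` of the current piece is consumed
def pieceP (pre cs : List Char) : List String :=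
  ((((mySplit cs).modifyHead (pre ++ ·)).map PySem.Chars.strip).filter (· ≠ [])).map String.ofList

theorem pieceP_nil_pre (cs : List Char) : pieceP [] cs = pieceF cs := by
  obtain ⟨f, fs, hf⟩ := List.exists_cons_of_ne_nil (mySplit_ne_nil cs)
  simp [pieceP, pieceF, hf, List.modifyHead]

theorem pieceP_empty (pre : List Char) :
    pieceP pre [] = if PySem.Chars.strip pre ≠ [] then [String.ofList (PySem.Chars.strip pre)] else [] := by
  simp [pieceP, mySplit, List.modifyHead, List.filter]
  split_ifs <;> simp_all

theorem pieceP_comma (pre : List Char) (rest : List Char) :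
    pieceP pre (',' :: rest)
      = (if PySem.Chars.strip pre ≠ [] then [String.ofList (PySem.Chars.strip pre)] else []) ++ pieceF rest := by
  simp only [pieceP, pieceF, mySplit, List.modifyHead]
  split_ifs <;> simp_all

theorem pieceP_cons (pre : List Char) (c : Char) (rest : List Char) (hc : c ≠ ',') :
    pieceP pre (c :: rest) = pieceP (pre ++ [c]) rest := by
  obtain ⟨f, fs, hf⟩ := List.exists_cons_of_ne_nil (mySplit_ne_nil rest)
  simp [pieceP, mySplit, if_neg hc, hf, List.modifyHead]

theorem pieceP_ws (c : Char) (pre cs : List Char) (h : PySem.Chars.isspace c = true) :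
    pieceP (c :: pre) cs = pieceP pre cs := by
  obtain ⟨f, fs, hf⟩ := List.exists_cons_of_ne_nil (mySplit_ne_nil cs)
  simp [pieceP, hf, List.modifyHead, strip_cons_ws c (pre ++ f) h]

-- the main invariant of B's scan
theorem scan_spec (cs : List Char) : ∀ (token pending : List Char) (tags : List String),
    (∀ c ∈ cs, pvDomChar c = true) →
    (∀ x ∈ pending, PySem.Chars.isspace x = true) →
    (token = [] → pending = []) →
    (∀ h : token ≠ [], PySem.Chars.isspace (token.head h) = false ∧
        PySem.Chars.isspace (token.getLast h) = false) →
    scanB cs token pending tags = tags ++ pieceP (token ++ pending) cs := by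
  induction cs with
  | nil =>
    intro token pending tags _ hp he ht
    rw [pieceP_empty, strip_state token pending hp he ht]
    simp only [scanB]
    split_ifs <;> simp
  | cons c rest ih =>
    intro token pending tags hdom hp he ht
    have hdc : pvDomChar c = true := hdom c (by simp)
    have hdr : ∀ c ∈ rest, pvDomChar c = true := fun x hx => hdom x (by simp [hx])
    simp only [scanB]
    by_cases hc : c = ','
    · subst hc
      rw [if_pos rfl, ih [] [] _ hdr (by simp) (fun _ => rfl) (by simp),
          List.nil_append, pieceP_nil_pre, pieceP_comma,
          strip_state token pending hp he ht]
      split_ifs <;> simp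
    · rw [if_neg hc]
      by_cases hw : pvWs.contains c = true
      · rw [if_pos hw]
        have hsp : PySem.Chars.isspace c = true := by rw [← ws_iff c hdc]; exact hw
        cases htk : token with
        | nil =>
          have hpe : pending = [] := he htk
          subst htk hpe
          rw [if_neg (by simp), ih [] [] tags hdr (by simp) (fun _ => rfl) (by simp)]
          simp only [List.nil_append]
          rw [pieceP_cons [] c rest hc]
          simp only [List.nil_append]
          rw [pieceP_ws c [] rest hsp]
        | cons t ts =>
          rw [← htk, if_pos (by simp [htk])]
          rw [ih token (pending ++ [c]) tags hdr
                (by intro x hx; rcases List.mem_append.mp hx with h | h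
                    · exact hp x h
                    · simp at h; subst h; exact hsp)
                (by intro h; exact absurd h (by simp [htk])) ht]
          rw [pieceP_cons _ c rest hc, List.append_assoc]
      · rw [if_neg hw]
        have hsp : PySem.Chars.isspace c = false := by
          rw [← ws_iff c hdc]; exact Bool.not_eq_true _ ▸ (by simpa using hw)
        rw [ih (token ++ pending ++ [c]) [] tags hdr (by simp) (by simp) ?_]
        · rw [List.append_nil, pieceP_cons _ c rest hc]
        · intro h
          refine ⟨?_, ?_⟩
          · by_cases hz : token = []
            · have hpe : pending = [] := he hz
              subst hz hpe
              simpa using hsp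
            · have h1 := (ht hz).1
              have htp : token ++ pending ≠ [] := by simp [hz]
              rw [List.head_append_of_ne_nil htp, List.head_append_of_ne_nil hz]
              exact h1
          · rw [List.getLast_append]
            simpa using hsp

-- B-side characterisation --------------------------------------------------

theorem b_foldl (values : List (Option String)) (acc : List String)
    (hdom : Dom_parse_tags_form_py values) :
    values.foldl (fun tags raw =>
      match raw with
      | none => tags
      | some s => scanB s.toList [] [] tags) acc
    = acc ++ (values.filterMap id).flatMap (fun s => pieceF s.toList) := by
  induction values generalizing acc with
  | nil => simp
  | cons raw vs ih =>
    have hdv : Dom_parse_tags_form_py vs := by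
      simp only [Dom_parse_tags_form_py, List.all_cons, Bool.and_eq_true] at hdom ⊢
      exact hdom.2
    cases raw with
    | none =>
      rw [List.foldl_cons]
      show List.foldl _ acc vs = _
      rw [ih acc hdv]
      simp
    | some s =>
      have hds : ∀ c ∈ s.toList, pvDomChar c = true := by
        simp only [Dom_parse_tags_form_py, List.all_cons, Bool.and_eq_true, Option.map_some,
          Option.getD_some, pvDomStr, List.all_eq_true] at hdom
        exact fun c hc => hdom.1 c hc
      rw [List.foldl_cons]
      show List.foldl _ (scanB s.toList [] [] acc) vs = _
      rw [scan_spec s.toList [] [] acc hds (by simp) (fun _ => rfl) (by simp),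
          List.nil_append, pieceP_nil_pre, ih _ hdv]
      simp

-- ===== VERDICT (by name: the statement is the Claim_ definition above) =====
theorem parse_tags_form_py_spec : Claim_equal_parse_tags_form_py := by
  intro values hdom
  unfold Spec_parse_tags_form_py
  show parse_tags_form_py values = parse_tags_form_py_alt values
  unfold parse_tags_form_py parse_tags_form_py_alt
  rw [a_foldl, b_foldl values [] hdom]
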